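-- pv_equiv track=rewrite | github.com/jquast/hxyzzy | hypermeadow/hyperlinks.py | store_urldata
-- ===== SOURCE A (Python) =====
-- def store_urldata(current_url, outgoing_urls, store):
--     # list of urls that should be queued for fetching: they are new and
--     # have not yet been discovered until evaluated here.
--     new_urls = set()
--
--     # track 'incoming' links,
--     for o_url in outgoing_urls:
--         if not o_url in store:
--             store[o_url] = {
--                     'incoming': set((current_url,)),
--                     'outgoing': set()
--                     }
--             new_urls.add (o_url)
--         else:
--             store[o_url]['incoming'].add(current_url)
--
--     # track 'outgoing' links
--     if not current_url in store:
--         store[current_url] = {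
--                 'incoming': set(),
--                 'outgoing': set(outgoing_urls)
--                 }
--     else:
--         store[current_url]['outgoing'].update(set(outgoing_urls))
--
--     return new_urls
-- ===== SOURCE B (Python) =====
-- def store_urldata(current_url, outgoing_urls, store):
--     # Patch-graph decomposition: first aggregate the whole update as a small
--     # "delta" graph keyed by node (incoming/outgoing contributions of this page),
--     # then merge that delta into the store in one pass over the delta's nodes.
--     # A node is newly discovered iff it is absent from the store and the delta
--     # gives it an incoming link (i.e. it was linked to, not merely the page itself).
--     delta = {}
--     for u in outgoing_urls:
--         delta.setdefault(u, {'incoming': set(), 'outgoing': set()})['incoming'].add(current_url)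
--     delta.setdefault(current_url, {'incoming': set(), 'outgoing': set()})['outgoing'].update(outgoing_urls)
--
--     new_urls = set()
--     for node, patch in delta.items():
--         if node in store:
--             if patch['incoming']:
--                 store[node]['incoming'] |= patch['incoming']
--             if patch['outgoing']:
--                 store[node]['outgoing'] |= patch['outgoing']
--         else:
--             store[node] = patch
--             if patch['incoming']:
--                 new_urls.add(node)
--     return new_urls
-- ===== Notes on version B (the rewrite author's own statement) =====
-- stated objective: alternative
-- what changed: B replaces A's interleaved test-and-mutate walk over outgoing_urls with a two-stage patch-graph algorithm: it first aggregates the whole update into a delta dict (per-node incoming/outgoing contributions, current_url's outgoing included), then merges that delta into the store in one pass over the delta's nodes, classifying a node as new iff it is absent and its delta has an incoming link.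
import Mathlib
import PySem

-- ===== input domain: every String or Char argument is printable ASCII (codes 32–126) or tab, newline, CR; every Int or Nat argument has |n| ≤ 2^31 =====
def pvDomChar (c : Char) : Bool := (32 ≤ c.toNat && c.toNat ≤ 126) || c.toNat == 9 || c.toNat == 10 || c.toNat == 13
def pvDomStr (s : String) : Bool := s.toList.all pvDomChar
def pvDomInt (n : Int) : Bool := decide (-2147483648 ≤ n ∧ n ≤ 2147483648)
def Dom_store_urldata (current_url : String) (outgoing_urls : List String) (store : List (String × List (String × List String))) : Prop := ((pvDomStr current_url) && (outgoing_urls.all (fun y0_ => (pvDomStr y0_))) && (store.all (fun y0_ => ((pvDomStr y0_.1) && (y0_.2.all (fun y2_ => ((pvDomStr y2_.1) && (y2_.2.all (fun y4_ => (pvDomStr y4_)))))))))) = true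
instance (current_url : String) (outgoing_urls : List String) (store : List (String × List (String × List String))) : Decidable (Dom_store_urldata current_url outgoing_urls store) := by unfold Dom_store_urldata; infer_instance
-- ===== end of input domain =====

-- B replaces A's interleaved test-and-mutate walk with a two-stage patch-graph algorithm (aggregate a
-- delta dict of per-node contributions, then merge it into the store); same cost, 'alternative'.
-- Both Pythons mutate `store` in place identically; the equivalence proved here is about the RETURN
-- value (the set of new urls).

-- ===== PORT A =====
-- the store dict[str, dict[str, set[str]]] as a PySem.Dict (assoc-list input converted at entry)
def pvStore : Type := PySem.Dict String (PySem.Dict String (PySem.Set String))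

def pvConv (store : List (String × List (String × List String))) : pvStore :=
  PySem.Dict.mk (store.map (fun p => (p.1, PySem.Dict.mk (p.2.map (fun q => (q.1, PySem.Set.ofList q.2))))))

def pvAInner (inc outg : PySem.Set String) : PySem.Dict String (PySem.Set String) :=
  PySem.Dict.mk [("incoming", inc), ("outgoing", outg)]

-- one iteration of A's 'for o_url in outgoing_urls' loop, state = (store, new_urls)
def pvAStep (current_url : String) (st : pvStore × PySem.Set String) (o_url : String) :
    pvStore × PySem.Set String :=
  if st.1.contains o_url then
    (st.1.modify o_url PySem.Dict.empty
       (fun inner => inner.modify "incoming" PySem.Set.empty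
          (fun s => PySem.Set.add s current_url)), st.2)
  else
    (st.1.insert o_url (pvAInner (PySem.Set.add PySem.Set.empty current_url) PySem.Set.empty),
     PySem.Set.add st.2 o_url)

def store_urldata (current_url : String) (outgoing_urls : List String) (store : List (String × List (String × List String))) : List String :=
  let st := outgoing_urls.foldl (pvAStep current_url) (pvConv store, PySem.Set.empty)
  -- the 'outgoing' tracking mutates the store only; it does not touch new_urls
  let _d2 : pvStore :=
    if st.1.contains current_url then
      st.1.modify current_url PySem.Dict.empty
        (fun inner => inner.modify "outgoing" PySem.Set.empty
           (fun s => PySem.Set.update s outgoing_urls))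
    else
      st.1.insert current_url (pvAInner PySem.Set.empty (PySem.Set.ofList outgoing_urls))
  st.2

-- ===== PORT B =====
-- {'incoming': set(), 'outgoing': set()}
def pvBPatch0 : PySem.Dict String (PySem.Set String) :=
  PySem.Dict.mk [("incoming", PySem.Set.empty), ("outgoing", PySem.Set.empty)]

-- delta.setdefault(u, patch0)['incoming'].add(current_url)
def pvBDeltaStep (current_url : String)
    (d : pvStore) (u : String) : pvStore :=
  (d.setdefault u pvBPatch0).modify u PySem.Dict.empty
    (fun p => p.modify "incoming" PySem.Set.empty (fun s => PySem.Set.add s current_url))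

-- one iteration of B's merge loop over delta.items(); patch['incoming'] is PySem.Dict.getD
-- (the key is always present in the patches B builds)
def pvBMergeStep (st : pvStore × PySem.Set String)
    (pr : String × PySem.Dict String (PySem.Set String)) : pvStore × PySem.Set String :=
  if st.1.contains pr.1 then
    let s1 := if (pr.2.getD "incoming" PySem.Set.empty).isEmpty then st.1 else
      st.1.modify pr.1 PySem.Dict.empty
        (fun inner => inner.modify "incoming" PySem.Set.empty
           (fun s => PySem.Set.update s (pr.2.getD "incoming" PySem.Set.empty)))
    let s2 := if (pr.2.getD "outgoing" PySem.Set.empty).isEmpty then s1 else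
      s1.modify pr.1 PySem.Dict.empty
        (fun inner => inner.modify "outgoing" PySem.Set.empty
           (fun s => PySem.Set.update s (pr.2.getD "outgoing" PySem.Set.empty)))
    (s2, st.2)
  else
    (st.1.insert pr.1 pr.2,
     if (pr.2.getD "incoming" PySem.Set.empty).isEmpty then st.2 else PySem.Set.add st.2 pr.1)

def store_urldata_alt (current_url : String) (outgoing_urls : List String) (store : List (String × List (String × List String))) : List String :=
  let delta1 := outgoing_urls.foldl (pvBDeltaStep current_url) PySem.Dict.empty
  let delta := (delta1.setdefault current_url pvBPatch0).modify current_url PySem.Dict.empty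
    (fun p => p.modify "outgoing" PySem.Set.empty (fun s => PySem.Set.update s outgoing_urls))
  let st := delta.items.foldl pvBMergeStep (pvConv store, PySem.Set.empty)
  st.2

-- ===== PRECONDITION & SPEC =====
-- A (and B) raise KeyError when a store entry touched by the update lacks the 'incoming'
-- (for a key in outgoing_urls) or 'outgoing' (for the current_url entry) sub-key; Pre_ excludes exactly those.
def Pre_store_urldata (current_url : String) (outgoing_urls : List String) (store : List (String × List (String × List String))) : Prop :=
  ∀ p ∈ store, (p.1 ∈ outgoing_urls → "incoming" ∈ p.2.map (·.1)) ∧ (p.1 = current_url → "outgoing" ∈ p.2.map (·.1))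
instance (current_url : String) (outgoing_urls : List String) (store : List (String × List (String × List String))) : Decidable (Pre_store_urldata current_url outgoing_urls store) := by unfold Pre_store_urldata; infer_instance
def pvWitness_store_urldata : String × List String × (List (String × List (String × List String))) :=
  ("a", ["b", "c"], [("b", [("incoming", ["a"]), ("outgoing", [])])])

def Spec_store_urldata (current_url : String) (outgoing_urls : List String) (store : List (String × List (String × List String))) (out : List String) : Prop := out = store_urldata_alt current_url outgoing_urls store
instance (current_url : String) (outgoing_urls : List String) (store : List (String × List (String × List String))) (out : List String) : Decidable (Spec_store_urldata current_url outgoing_urls store out) := by unfold Spec_store_urldata; infer_instance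

-- ===== CLAIM (what is proved, stated in full; the proofs are below) =====
def Claim_equal_store_urldata : Prop := ∀ (current_url : String) (outgoing_urls : List String) (store : List (String × List (String × List String))), Dom_store_urldata current_url outgoing_urls store → Pre_store_urldata current_url outgoing_urls store → Spec_store_urldata current_url outgoing_urls store (store_urldata current_url outgoing_urls store)

-- ===== LEMMAS AND PROOFS =====

-- A's loop invariant: if the store's key set is always (original keys P) ∪ (collected new_urls),
-- then the collected new_urls evolve exactly like the conditional-add fold over P.
lemma pvA_loop (c : String) (P : String → Bool) :
    ∀ (l : List String) (d : pvStore) (nu : PySem.Set String),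
      (∀ u, d.contains u = true ↔ (P u = true ∨ u ∈ nu)) →
      (l.foldl (pvAStep c) (d, nu)).2
        = l.foldl (fun s u => if P u then s else PySem.Set.add s u) nu := by
  intro l
  induction l with
  | nil => intro d nu _; rfl
  | cons o rest ih =>
    intro d nu h
    simp only [List.foldl_cons, pvAStep]
    by_cases hc : d.contains o = true
    · rw [if_pos hc]
      have hor : P o = true ∨ o ∈ nu := (h o).mp hc
      have hnu : (if P o then nu else PySem.Set.add nu o) = nu := by
        by_cases hp : P o = true
        · simp [hp]
        · have hm : o ∈ nu := hor.resolve_left hp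
          simp [hp, PySem.Set.add_of_mem hm]
      rw [hnu]
      apply ih
      intro u
      rw [PySem.Dict.contains_modify]
      by_cases hu : u = o
      · subst hu
        simp only [BEq.rfl, Bool.true_or, true_iff]
        exact hor
      · simp only [beq_eq_false_iff_ne.mpr hu, Bool.false_or]
        exact h u
    · rw [if_neg hc]
      have hor : ¬ (P o = true ∨ o ∈ nu) := fun hx => hc ((h o).mpr hx)
      have hp : P o = false := by
        cases hP : P o
        · rfl
        · exact absurd (Or.inl hP) hor
      have hm : o ∉ nu := fun hx => hor (Or.inr hx)
      rw [hp]
      simp only [Bool.false_eq_true, if_false]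
      apply ih
      intro u
      rw [PySem.Dict.contains_insert]
      by_cases hu : u = o
      · subst hu
        simp [PySem.Set.mem_add]
      · simp only [beq_eq_false_iff_ne.mpr hu, Bool.false_or, PySem.Set.mem_add]
        rw [h u]
        constructor
        · rintro (h1 | h1)
          · exact Or.inl h1
          · exact Or.inr (Or.inl h1)
        · rintro (h1 | h1 | h1)
          · exact Or.inl h1
          · exact Or.inr h1
          · exact absurd h1 hu

-- set(xs) commutes with a filter
lemma pvFilter_ofList (q : String → Bool) (l : List String) :
    (PySem.Set.ofList l).filter q = PySem.Set.ofList (l.filter q) := by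
  induction l with
  | nil => rfl
  | cons x xs ih =>
    rw [PySem.Set.ofList_cons]
    cases hq : q x
    · have hdrop : ((PySem.Set.ofList xs).discard x).filter q = ((PySem.Set.ofList xs)).filter q := by
        simp only [PySem.Set.discard, List.filter_filter]
        apply List.filter_congr
        intro a _
        cases ha : q a
        · simp
        · have : (a == x) = false := by
            refine beq_eq_false_iff_ne.mpr ?_
            intro hax; subst hax; rw [hq] at ha; exact Bool.false_ne_true ha
          simp [this]
      simp only [List.filter_cons, hq, Bool.false_eq_true, if_false, hdrop, ih]
    · simp only [List.filter_cons, hq, if_true, PySem.Set.ofList_cons, ← ih]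
      simp only [PySem.Set.discard, List.filter_filter]
      simp [Bool.and_comm]

-- the conditional-add fold from empty is the filtered set of l
lemma pvB_fold (P : String → Bool) (l : List String) :
    l.foldl (fun s u => if P u then s else PySem.Set.add s u) PySem.Set.empty
      = (PySem.Set.ofList l).filter (fun u => !P u) := by
  rw [pvFilter_ofList, PySem.Set.ofList_eq_foldl, List.foldl_filter]
  congr 1
  funext s u
  cases hP : P u <;> simp

-- the converted store has exactly the original key list as keys
lemma pvConv_contains (store : List (String × List (String × List String))) (u : String) :
    (pvConv store).contains u = true ↔ u ∈ store.map (·.1) := by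
  rw [pvConv, PySem.Dict.contains_mk]
  simp [List.any_eq_true, List.mem_map]

-- B's merge loop: over pairs with distinct keys whose store-membership is P, the collected
-- new_urls are the conditional-add fold (skip present keys and empty incoming patches)
lemma pvMerge_loop (P : String → Bool) :
    ∀ (pairs : List (String × PySem.Dict String (PySem.Set String))) (d : pvStore) (nu : PySem.Set String),
      (pairs.map Prod.fst).Nodup →
      (∀ p ∈ pairs, d.contains p.1 = P p.1) →
      (pairs.foldl pvBMergeStep (d, nu)).2
        = pairs.foldl (fun nu p => if P p.1 then nu
            else if (p.2.getD "incoming" PySem.Set.empty).isEmpty then nu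
            else PySem.Set.add nu p.1) nu := by
  intro pairs
  induction pairs with
  | nil => intro d nu _ _; rfl
  | cons p rest ih =>
    intro d nu hnd h
    have hp : d.contains p.1 = P p.1 := h p (List.mem_cons_self ..)
    have hnd' : p.1 ∉ rest.map Prod.fst ∧ (rest.map Prod.fst).Nodup := by
      rw [List.map_cons, List.nodup_cons] at hnd; exact hnd
    have hnotin : ∀ q ∈ rest, q.1 ≠ p.1 := by
      intro q hq he
      exact hnd'.1 (he ▸ List.mem_map_of_mem hq)
    simp only [List.foldl_cons, pvBMergeStep]
    by_cases hc : d.contains p.1 = true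
    · rw [if_pos hc, ← hp, hc]
      simp only [if_true]
      apply ih _ _ hnd'.2
      intro q hq
      have hne : (q.1 == p.1) = false := beq_eq_false_iff_ne.mpr (hnotin q hq)
      have hdq := h q (List.mem_cons_of_mem _ hq)
      split_ifs <;> simp [PySem.Dict.contains_modify, hne, hdq]
    · rw [if_neg hc, ← hp]
      simp only [Bool.not_eq_true] at hc
      rw [hc]
      simp only [Bool.false_eq_true, if_false]
      apply ih _ _ hnd'.2
      intro q hq
      rw [PySem.Dict.contains_insert, beq_eq_false_iff_ne.mpr (hnotin q hq), Bool.false_or]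
      exact h q (List.mem_cons_of_mem _ hq)

-- setdefault-then-modify at one key k: the key list gains exactly k
lemma pvTouch_keys (d : pvStore) (k : String)
    (f : PySem.Dict String (PySem.Set String) → PySem.Dict String (PySem.Set String)) :
    ((d.setdefault k pvBPatch0).modify k PySem.Dict.empty f).keys = PySem.Set.add d.keys k := by
  by_cases hc : d.contains k = true
  · rw [PySem.Dict.setdefault_of_contains _ _ hc, PySem.Dict.keys_modify,
        PySem.Dict.keys_insert_of_contains _ _ hc,
        PySem.Set.add_of_mem ((PySem.Dict.contains_iff_mem_keys _ _).mp hc)]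
  · have hc' : d.contains k = false := by simpa using hc
    rw [PySem.Dict.setdefault_of_not_contains _ _ hc', PySem.Dict.keys_modify,
        PySem.Dict.keys_insert_of_contains _ _ (PySem.Dict.contains_insert_self ..),
        PySem.Dict.keys_insert_of_not_contains _ _ hc',
        PySem.Set.add_of_not_mem (fun hm => hc ((PySem.Dict.contains_iff_mem_keys _ _).mpr hm))]

-- setdefault-then-modify at k leaves every other key's value unchanged
lemma pvTouch_getD_ne (d : pvStore) (k k' : String)
    (f : PySem.Dict String (PySem.Set String) → PySem.Dict String (PySem.Set String))
    (hne : k' ≠ k) :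
    ((d.setdefault k pvBPatch0).modify k PySem.Dict.empty f).getD k' PySem.Dict.empty
      = d.getD k' PySem.Dict.empty := by
  rw [PySem.Dict.getD_modify_of_ne _ _ _ hne]
  by_cases hc : d.contains k = true
  · rw [PySem.Dict.setdefault_of_contains _ _ hc]
  · rw [PySem.Dict.setdefault_of_not_contains _ _ (by simpa using hc),
        PySem.Dict.getD_insert_of_ne _ _ _ hne]

-- the delta-building loop: its key list is exactly set(prefix) appended to the start keys
lemma pvDelta_keys (c : String) :
    ∀ (l : List String) (d : pvStore),
      (l.foldl (pvBDeltaStep c) d).keys = PySem.Set.update d.keys l := by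
  intro l
  induction l with
  | nil => intro d; simp [PySem.Set.update]
  | cons x xs ih =>
    intro d
    rw [List.foldl_cons, ih, PySem.Set.update_cons]
    congr 1
    exact pvTouch_keys d x _

-- the delta-building loop puts current_url into the incoming patch of every url it saw
lemma pvDelta_inc (c : String) :
    ∀ (l : List String) (d : pvStore) (u : String),
      (u ∈ l ∨ c ∈ ((d.getD u PySem.Dict.empty).getD "incoming" PySem.Set.empty)) →
      c ∈ (((l.foldl (pvBDeltaStep c) d).getD u PySem.Dict.empty).getD "incoming" PySem.Set.empty) := by
  intro l
  induction l with
  | nil =>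
    intro d u h
    simpa using h.resolve_left (by simp)
  | cons x xs ih =>
    intro d u h
    rw [List.foldl_cons]
    apply ih
    by_cases hux : u = x
    · right
      subst hux
      rw [pvBDeltaStep, PySem.Dict.getD_modify_self, PySem.Dict.getD_modify_self]
      exact (PySem.Set.mem_add _ _ _).mpr (Or.inr rfl)
    · rcases h with h | h
      · rcases List.mem_cons.mp h with h | h
        · exact absurd h hux
        · exact Or.inl h
      · right
        rw [pvBDeltaStep, pvTouch_getD_ne _ _ _ _ hux]
        exact h

-- ===== VERDICT (by name: the statement is the Claim_ definition above) =====
theorem store_urldata_spec : Claim_equal_store_urldata := by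
  intro current_url outgoing_urls store _ _
  unfold Spec_store_urldata
  have hPiff : ∀ u, ((PySem.Set.ofList (store.map (·.1))).contains u) = true ↔ u ∈ store.map (·.1) := by
    intro u; rw [PySem.Set.contains_iff, PySem.Set.mem_ofList]
  set P : String → Bool := fun u => (PySem.Set.ofList (store.map (·.1))).contains u with hPdef
  -- ===== the A side =====
  have hA : store_urldata current_url outgoing_urls store
      = (PySem.Set.ofList outgoing_urls).filter (fun u => !P u) := by
    have hinv : ∀ u, (pvConv store).contains u = true ↔ (P u = true ∨ u ∈ (PySem.Set.empty : PySem.Set String)) := by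
      intro u
      rw [pvConv_contains]
      simp [hPdef, PySem.Set.mem_ofList, PySem.Set.empty]
    calc store_urldata current_url outgoing_urls store
        = (outgoing_urls.foldl (pvAStep current_url) (pvConv store, PySem.Set.empty)).2 := rfl
      _ = _ := by rw [pvA_loop current_url P outgoing_urls (pvConv store) PySem.Set.empty hinv, pvB_fold]
  -- ===== the B side =====
  have hB : store_urldata_alt current_url outgoing_urls store
      = (PySem.Set.ofList outgoing_urls).filter (fun u => !P u) := by
    have hkeys1 : (outgoing_urls.foldl (pvBDeltaStep current_url) PySem.Dict.empty).keys
        = PySem.Set.ofList outgoing_urls := by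
      rw [pvDelta_keys]; rfl
    set delta1 := outgoing_urls.foldl (pvBDeltaStep current_url) PySem.Dict.empty with hd1
    set delta := (delta1.setdefault current_url pvBPatch0).modify current_url PySem.Dict.empty
        (fun p => p.modify "outgoing" PySem.Set.empty (fun s => PySem.Set.update s outgoing_urls)) with hd
    have hkeys : delta.keys = PySem.Set.add (PySem.Set.ofList outgoing_urls) current_url := by
      rw [hd, pvTouch_keys, hkeys1]
    have hnd : delta.keys.Nodup := by
      rw [hkeys]; exact PySem.Set.nodup_add _ _ (PySem.Set.nodup_ofList _)
    have hinc : ∀ k ∈ outgoing_urls,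
        current_url ∈ ((delta.getD k PySem.Dict.empty).getD "incoming" PySem.Set.empty) := by
      intro k hk
      have h1 : current_url ∈ ((delta1.getD k PySem.Dict.empty).getD "incoming" PySem.Set.empty) :=
        pvDelta_inc current_url outgoing_urls PySem.Dict.empty k (Or.inl hk)
      by_cases hkc : k = current_url
      · subst hkc
        have hc1 : delta1.contains k = true := by
          rw [PySem.Dict.contains_iff_mem_keys, hkeys1, PySem.Set.mem_ofList]; exact hk
        rw [hd, PySem.Dict.setdefault_of_contains _ _ hc1, PySem.Dict.getD_modify_self,
            PySem.Dict.getD_modify_of_ne _ _ _ (by decide : ("incoming" : String) ≠ "outgoing")]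
        exact h1
      · rw [hd, pvTouch_getD_ne _ _ _ _ hkc]; exact h1
    have hcont : ∀ p ∈ delta.items, (pvConv store).contains p.1 = P p.1 := by
      intro p _
      have h1 : (pvConv store).contains p.1 = true ↔ P p.1 = true := by
        rw [pvConv_contains]; exact (hPiff p.1).symm
      cases ha : (pvConv store).contains p.1 <;> cases hb : P p.1 <;> simp_all
    have hndm : (delta.items.map Prod.fst).Nodup := hnd
    calc store_urldata_alt current_url outgoing_urls store
        = (delta.items.foldl pvBMergeStep (pvConv store, PySem.Set.empty)).2 := rfl
      _ = delta.items.foldl (fun nu p => if P p.1 then nu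
            else if (p.2.getD "incoming" PySem.Set.empty).isEmpty then nu
            else PySem.Set.add nu p.1) PySem.Set.empty :=
          pvMerge_loop P delta.items (pvConv store) PySem.Set.empty hndm hcont
      _ = delta.keys.foldl (fun nu k => if P k then nu
            else if ((delta.getD k PySem.Dict.empty).getD "incoming" PySem.Set.empty).isEmpty then nu
            else PySem.Set.add nu k) PySem.Set.empty := by
          rw [PySem.Dict.items_eq_map_keys delta hnd PySem.Dict.empty, List.foldl_map]
      _ = (PySem.Set.ofList outgoing_urls).filter (fun u => !P u) := by
          have hstep : ∀ (nu : PySem.Set String), ∀ k ∈ PySem.Set.ofList outgoing_urls,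
              (if P k then nu
               else if ((delta.getD k PySem.Dict.empty).getD "incoming" PySem.Set.empty).isEmpty then nu
               else PySem.Set.add nu k)
                = (if P k then nu else PySem.Set.add nu k) := by
            intro nu k hk
            have hmem := hinc k ((PySem.Set.mem_ofList _ _).mp hk)
            have hne : ((delta.getD k PySem.Dict.empty).getD "incoming" PySem.Set.empty).isEmpty = false := by
              cases hE : ((delta.getD k PySem.Dict.empty).getD "incoming" PySem.Set.empty).isEmpty
              · rfl
              · rw [List.isEmpty_iff] at hE
                rw [hE] at hmem
                exact absurd hmem (List.not_mem_nil)
            rw [hne]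
            simp
          have hcond : (PySem.Set.ofList outgoing_urls).foldl
              (fun nu k => if P k then nu else PySem.Set.add nu k) PySem.Set.empty
                = (PySem.Set.ofList outgoing_urls).filter (fun u => !P u) := by
            rw [pvB_fold P (PySem.Set.ofList outgoing_urls), PySem.Set.ofList_ofList]
          by_cases hc : current_url ∈ outgoing_urls
          · rw [hkeys, PySem.Set.add_of_mem ((PySem.Set.mem_ofList _ _).mpr hc),
                PySem.List.foldl_congr_mem _ _ _ _ hstep, hcond]
          · have hcur0 : (delta.getD current_url PySem.Dict.empty).getD "incoming" PySem.Set.empty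
                = PySem.Set.empty := by
              have hc1 : delta1.contains current_url = false := by
                cases hcc : delta1.contains current_url
                · rfl
                · exact absurd ((PySem.Set.mem_ofList _ _).mp
                    (hkeys1 ▸ (PySem.Dict.contains_iff_mem_keys _ _).mp hcc)) hc
              rw [hd, PySem.Dict.setdefault_of_not_contains _ _ hc1, PySem.Dict.getD_modify_self,
                  PySem.Dict.getD_insert_self,
                  PySem.Dict.getD_modify_of_ne _ _ _ (by decide : ("incoming" : String) ≠ "outgoing")]
              rfl
            rw [hkeys, PySem.Set.add_of_not_mem (fun hm => hc ((PySem.Set.mem_ofList _ _).mp hm)),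
                List.foldl_append, PySem.List.foldl_congr_mem _ _ _ _ hstep, hcond]
            simp only [List.foldl_cons, List.foldl_nil, hcur0]
            cases hx : P current_url <;> simp
  rw [hA, hB]
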